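-- pv_equiv track=rewrite | github.com/JMJuarez/modulo_pln_vf | app/preprocess.py | spell_out_text
-- ===== SOURCE A (Python) =====
-- from typing import List
--
-- def spell_out_text(text: str, include_spaces: bool = True) -> List[str]:
--     """
--     Deletrea un texto carácter por carácter.
--
--     Args:
--         text: Texto a deletrear
--         include_spaces: Si True, incluye espacios en el deletreo
--
--     Returns:
--         Lista con cada carácter/palabra deletreada
--     """
--     if not text:
--         return []
--
--     result = []
--     i=0
--     text_upper = text.upper()
--     while i < len(text_upper):
--         char = text_upper[i]
--         if i + 1 < len(text_upper) and text_upper[i:i+2] == 'LL':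
--             result.append('LL')
--             i += 2
--             continue
--
--         # 2. Comprobar 'RR'
--         if i + 1 < len(text_upper) and text_upper[i:i+2] == 'RR':
--             result.append('RR')
--             i += 2
--             continue
--
--         # 3. Comprobar 'CH'
--         if i + 1 < len(text_upper) and text_upper[i:i+2] == 'CH':
--             result.append('CH')
--             i += 2
--             continue
--
--         if char == ' ':
--             if include_spaces:
--                 result.append("espacio")
--         elif char.isalpha():
--             result.append(char)
--         elif char.isdigit():
--             result.append(char)
--         else:
--             # Para caracteres especiales, usar su nombre
--             special_chars = {
--                 '.': 'punto',
--                 ',': 'coma',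
--                 ';': 'punto y coma',
--                 ':': 'dos puntos',
--                 '!': 'exclamación',
--                 '?': 'interrogación',
--                 '-': 'guión',
--                 '_': 'guión bajo',
--                 '@': 'arroba',
--                 '#': 'numeral',
--                 '$': 'dólar',
--                 '%': 'porcentaje',
--                 '&': 'ampersand',
--                 '/': 'barra',
--                 '\\': 'barra invertida',
--                 '(': 'paréntesis abierto',
--                 ')': 'paréntesis cerrado',
--                 '[': 'corchete abierto',
--                 ']': 'corchete cerrado',
--                 '{': 'llave abierta',
--                 '}': 'llave cerrada',
--                 '+': 'más',
--                 '=': 'igual',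
--                 '*': 'asterisco',
--                 '"': 'comillas',
--                 "'": 'comilla simple',
--             }
--             result.append(special_chars.get(char, f"carácter especial: {char}"))
--         i += 1
--     return result
-- ===== SOURCE B (Python) =====
-- from typing import List
--
-- DIGRAPHS = ('LL', 'RR', 'CH')
--
-- SPECIAL = {
--     '.': 'punto', ',': 'coma', ';': 'punto y coma', ':': 'dos puntos',
--     '!': 'exclamación', '?': 'interrogación', '-': 'guión', '_': 'guión bajo',
--     '@': 'arroba', '#': 'numeral', '$': 'dólar', '%': 'porcentaje',
--     '&': 'ampersand', '/': 'barra', '\\': 'barra invertida',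
--     '(': 'paréntesis abierto', ')': 'paréntesis cerrado',
--     '[': 'corchete abierto', ']': 'corchete cerrado',
--     '{': 'llave abierta', '}': 'llave cerrada', '+': 'más', '=': 'igual',
--     '*': 'asterisco', '"': 'comillas', "'": 'comilla simple',
-- }
--
--
-- def _spell_token(token: str, include_spaces: bool) -> List[str]:
--     if len(token) == 2:          # a digraph token: spelled as itself
--         return [token]
--     if token == ' ':
--         return ['espacio'] if include_spaces else []
--     if token.isalpha() or token.isdigit():
--         return [token]
--     return [SPECIAL.get(token, f"carácter especial: {token}")]
--
--
-- def spell_out_text(text: str, include_spaces: bool = True) -> List[str]: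
--     if not text:
--         return []
--     upper = text.upper()
--     tokens = []
--     i = 0
--     while i < len(upper):
--         pair = upper[i:i+2]
--         if pair in DIGRAPHS:
--             tokens.append(pair)
--             i += 2
--         else:
--             tokens.append(pair[:1])
--             i += 1
--     return [name for tok in tokens for name in _spell_token(tok, include_spaces)]
-- ===== Notes on version B (the rewrite author's own statement) =====
-- stated objective: idiomatic
-- what changed: Replaced A's single while-loop with inline dispatch (and a special-chars dict rebuilt on every special character) by a two-phase tokenize-then-map pipeline: one pass groups the uppercased text into digraph/single-char tokens, then a comprehension maps each token through a hoisted module-level table.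
import Mathlib
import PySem

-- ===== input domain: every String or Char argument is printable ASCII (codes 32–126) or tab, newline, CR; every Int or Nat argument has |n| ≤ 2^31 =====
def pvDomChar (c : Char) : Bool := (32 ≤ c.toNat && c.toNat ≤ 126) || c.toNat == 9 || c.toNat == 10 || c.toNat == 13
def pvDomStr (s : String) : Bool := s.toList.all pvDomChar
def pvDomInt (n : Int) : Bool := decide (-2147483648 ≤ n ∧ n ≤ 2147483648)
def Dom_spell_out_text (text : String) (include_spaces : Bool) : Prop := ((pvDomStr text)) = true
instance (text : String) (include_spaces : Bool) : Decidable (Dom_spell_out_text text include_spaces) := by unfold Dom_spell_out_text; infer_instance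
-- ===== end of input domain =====

-- B replaces A's single inline-dispatch while-loop by a tokenize-then-map pipeline with a hoisted
-- special-chars table (objective: idiomatic); same return value, no side effects in either version.

-- the special_chars dict literal (identical text in Source A and Source B; shared helper)
def pvSpecialChars : PySem.Dict String String := PySem.Dict.ofList [
  (".", "punto"), (",", "coma"), (";", "punto y coma"), (":", "dos puntos"),
  ("!", "exclamación"), ("?", "interrogación"), ("-", "guión"), ("_", "guión bajo"),
  ("@", "arroba"), ("#", "numeral"), ("$", "dólar"), ("%", "porcentaje"),
  ("&", "ampersand"), ("/", "barra"), ("\\", "barra invertida"),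
  ("(", "paréntesis abierto"), (")", "paréntesis cerrado"),
  ("[", "corchete abierto"), ("]", "corchete cerrado"),
  ("{", "llave abierta"), ("}", "llave cerrada"), ("+", "más"), ("=", "igual"),
  ("*", "asterisco"), ("\"", "comillas"), ("'", "comilla simple")]

-- ===== PORT A =====
-- the single-char dispatch in A's loop body (space / isalpha / isdigit / special_chars.get)
def pvSingleA (include_spaces : Bool) (c : Char) : List String :=
  if c = ' ' then (if include_spaces then ["espacio"] else [])
  else if PySem.Chars.isalpha c then [String.singleton c]
  else if PySem.Chars.isdigit c then [String.singleton c]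
  else [PySem.Dict.getD pvSpecialChars (String.singleton c)
          ("carácter especial: " ++ String.singleton c)]

-- A's while-loop over text_upper, as structural recursion on the remaining characters
-- (the three 'i+1 < len ∧ text_upper[i:i+2] == ..' checks are the char-pair tests below)
def pvLoopA (include_spaces : Bool) : List Char → List String
  | [] => []
  | [c] => pvSingleA include_spaces c
  | c :: c2 :: rest =>
    if c = 'L' ∧ c2 = 'L' then "LL" :: pvLoopA include_spaces rest
    else if c = 'R' ∧ c2 = 'R' then "RR" :: pvLoopA include_spaces rest
    else if c = 'C' ∧ c2 = 'H' then "CH" :: pvLoopA include_spaces rest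
    else pvSingleA include_spaces c ++ pvLoopA include_spaces (c2 :: rest)

def spell_out_text (text : String) (include_spaces : Bool) : List String :=
  if text = "" then []
  else pvLoopA include_spaces (PySem.Str.upper text).toList

-- ===== PORT B =====
-- Source B's tokenizer loop: pair = upper[i:i+2]; digraph tokens consume two chars, else one
def pvTok : List Char → List String
  | [] => []
  | [c] => [String.singleton c]
  | c :: c2 :: rest =>
    if String.ofList [c, c2] ∈ ["LL", "RR", "CH"] then String.ofList [c, c2] :: pvTok rest
    else String.singleton c :: pvTok (c2 :: rest)

-- Source B's _spell_token
def pvSpellToken (token : String) (include_spaces : Bool) : List String :=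
  if PySem.Str.len token = 2 then [token]
  else if token = " " then (if include_spaces then ["espacio"] else [])
  else if PySem.Str.strIsalpha token || PySem.Str.strIsdigit token then [token]
  else [PySem.Dict.getD pvSpecialChars token ("carácter especial: " ++ token)]

def spell_out_text_alt (text : String) (include_spaces : Bool) : List String :=
  if text = "" then []
  else (pvTok (PySem.Str.upper text).toList).flatMap
         (fun tok => pvSpellToken tok include_spaces)

-- ===== PRECONDITION & SPEC =====
def Spec_spell_out_text (text : String) (include_spaces : Bool) (out : List String) : Prop := out = spell_out_text_alt text include_spaces
instance (text : String) (include_spaces : Bool) (out : List String) : Decidable (Spec_spell_out_text text include_spaces out) := by unfold Spec_spell_out_text; infer_instance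

-- ===== CLAIM (what is proved, stated in full; the proofs are below) =====
def Claim_equal_spell_out_text : Prop := ∀ (text : String) (include_spaces : Bool), Dom_spell_out_text text include_spaces → Spec_spell_out_text text include_spaces (spell_out_text text include_spaces)

-- ===== LEMMAS AND PROOFS =====
theorem pvOfListEq (l : List Char) (s : String) : (String.ofList l = s) ↔ l = s.toList := by
  constructor
  · intro h; subst h; simp
  · intro h; subst h; simp

theorem pvSpellToken_singleton (c : Char) (inc : Bool) :
    pvSpellToken (String.singleton c) inc = pvSingleA inc c := by
  have hlen : ¬ (PySem.Str.len (String.singleton c) = 2) := by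
    simp [PySem.Str.len_eq]
  have hsp : (String.singleton c = " ") ↔ c = ' ' := by
    constructor
    · intro h
      have h' := congrArg String.toList h
      simpa using h'
    · intro h; subst h; decide
  have halpha : PySem.Str.strIsalpha (String.singleton c) = PySem.Chars.isalpha c := by
    simp [PySem.Str.strIsalpha_eq, PySem.Chars.strIsalpha]
  have hdigit : PySem.Str.strIsdigit (String.singleton c) = PySem.Chars.isdigit c := by
    simp [PySem.Str.strIsdigit_eq, PySem.Chars.strIsdigit]
  unfold pvSpellToken pvSingleA
  rw [if_neg hlen]
  by_cases hc : c = ' '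
  · subst hc
    rw [if_pos (show String.singleton ' ' = " " from by decide), if_pos rfl]
  · rw [if_neg (fun h => hc (hsp.mp h)), if_neg hc, halpha, hdigit]
    by_cases ha : PySem.Chars.isalpha c
    · simp [ha]
    · by_cases hd : PySem.Chars.isdigit c
      · simp [ha, hd]
      · simp [ha, hd]

theorem pvSpellToken_two (a b : Char) (inc : Bool) :
    pvSpellToken (String.ofList [a, b]) inc = [String.ofList [a, b]] := by
  unfold pvSpellToken
  rw [if_pos (by simp [PySem.Str.len_eq])]

theorem pvLoop_eq_tok (inc : Bool) (l : List Char) :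
    pvLoopA inc l = (pvTok l).flatMap (fun tok => pvSpellToken tok inc) := by
  have hLL : ("LL" : String).toList = ['L', 'L'] := by decide
  have hRR : ("RR" : String).toList = ['R', 'R'] := by decide
  have hCH : ("CH" : String).toList = ['C', 'H'] := by decide
  fun_induction pvLoopA inc l with
  | case1 => rfl
  | case2 c =>
      simp only [pvTok, List.flatMap_cons, List.flatMap_nil, List.append_nil,
        pvSpellToken_singleton]
  | case3 c c2 rest h ih =>
      obtain ⟨rfl, rfl⟩ := h
      have ht : pvTok ('L' :: 'L' :: rest) = String.ofList ['L', 'L'] :: pvTok rest := by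
        simp only [pvTok]; rw [if_pos (by decide)]
      rw [ht, List.flatMap_cons, pvSpellToken_two, List.singleton_append, ih]
  | case4 c c2 rest h1 h ih =>
      obtain ⟨rfl, rfl⟩ := h
      have ht : pvTok ('R' :: 'R' :: rest) = String.ofList ['R', 'R'] :: pvTok rest := by
        simp only [pvTok]; rw [if_pos (by decide)]
      rw [ht, List.flatMap_cons, pvSpellToken_two, List.singleton_append, ih]
  | case5 c c2 rest h1 h2 h ih =>
      obtain ⟨rfl, rfl⟩ := h
      have ht : pvTok ('C' :: 'H' :: rest) = String.ofList ['C', 'H'] :: pvTok rest := by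
        simp only [pvTok]; rw [if_pos (by decide)]
      rw [ht, List.flatMap_cons, pvSpellToken_two, List.singleton_append, ih]
  | case6 c c2 rest h1 h2 h3 ih =>
      have hm : String.ofList [c, c2] ∉ (["LL", "RR", "CH"] : List String) := by
        intro hmem
        simp only [List.mem_cons, List.not_mem_nil, or_false] at hmem
        rcases hmem with he | he | he
        · exact h1 (by have := (pvOfListEq _ _).mp he; rw [hLL] at this
                       simpa using this)
        · exact h2 (by have := (pvOfListEq _ _).mp he; rw [hRR] at this
                       simpa using this)
        · exact h3 (by have := (pvOfListEq _ _).mp he; rw [hCH] at this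
                       simpa using this)
      have ht : pvTok (c :: c2 :: rest) = String.singleton c :: pvTok (c2 :: rest) := by
        simp only [pvTok]; rw [if_neg hm]
      rw [ht, List.flatMap_cons, pvSpellToken_singleton, ih]

-- ===== VERDICT (by name: the statement is the Claim_ definition above) =====
theorem spell_out_text_spec : Claim_equal_spell_out_text := by
  intro text inc _
  unfold Spec_spell_out_text spell_out_text spell_out_text_alt
  split
  · rfl
  · exact pvLoop_eq_tok inc _
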